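-- pv_equiv track=rewrite | github.com/Yunushan/trading-bot | Languages/Python/app/strategy_indicator_tracking.py | _normalize_interval_token
-- ===== SOURCE A (Python) =====
-- def _normalize_interval_token(value: str | None) -> str | None:
--     token = str(value or "").strip().lower()
--     if not token:
--         return None
--     token = token.replace(" ", "")
--     replacements = {
--         "minutes": "m",
--         "minute": "m",
--         "mins": "m",
--         "min": "m",
--         "seconds": "s",
--         "second": "s",
--         "secs": "s",
--         "sec": "s",
--         "hours": "h",
--         "hour": "h",
--         "hrs": "h",
--         "hr": "h",
--         "days": "d",
--         "day": "d",
--     }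
--     for src, dst in replacements.items():
--         if token.endswith(src):
--             token = token[: -len(src)] + dst
--             break
--     return token or None
-- ===== SOURCE B (Python) =====
-- # Suffix normalization via a length-indexed lookup: instead of scanning a
-- # 14-entry replacement dict with endswith, try each possible suffix length
-- # (longest first) and test the tail against a set of known unit words; the
-- # abbreviation is just the first letter of the matched word.
-- _SUFFIX_WORDS = frozenset((
--     "minutes", "minute", "mins", "min",
--     "seconds", "second", "secs", "sec",
--     "hours", "hour", "hrs", "hr",
--     "days", "day",
-- ))
--
--
-- def _normalize_interval_token(value):
--     token = str(value or "").strip().lower()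
--     if not token:
--         return None
--     token = token.replace(" ", "")
--     for n in (7, 6, 5, 4, 3, 2):
--         if n <= len(token) and token[-n:] in _SUFFIX_WORDS:
--             return token[:-n] + token[-n]
--     return token
-- ===== Notes on version B (the rewrite author's own statement) =====
-- stated objective: alternative
-- what changed: Replaces the endswith scan over the 14-entry replacement dict with a length-indexed lookup: try each possible suffix length longest-first, test the tail against a set of unit words, and abbreviate to the matched word's first letter.
import Mathlib
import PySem

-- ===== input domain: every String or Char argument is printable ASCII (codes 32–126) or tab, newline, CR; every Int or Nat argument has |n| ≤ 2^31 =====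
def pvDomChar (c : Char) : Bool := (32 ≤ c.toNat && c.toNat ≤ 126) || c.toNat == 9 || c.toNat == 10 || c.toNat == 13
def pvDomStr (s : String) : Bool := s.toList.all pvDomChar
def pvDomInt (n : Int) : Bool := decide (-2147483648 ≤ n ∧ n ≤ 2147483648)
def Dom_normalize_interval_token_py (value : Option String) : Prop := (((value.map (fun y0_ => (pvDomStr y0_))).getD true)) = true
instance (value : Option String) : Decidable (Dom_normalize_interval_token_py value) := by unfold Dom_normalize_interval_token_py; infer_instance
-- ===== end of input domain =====

-- B replaces A's endswith scan over a 14-entry replacement dict by a length-indexed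
-- lookup (try each suffix length, longest first, against a set of unit words; the
-- abbreviation is the first letter of the matched word) — alternative decomposition,
-- same cost. String operations are ported on code points via PySem.Chars (exact on
-- the ASCII domain).

-- ===== PORT A =====
-- 'value or ""'
def pvRawA (value : Option String) : String :=
  match value with
  | none => ""
  | some s => if s = "" then "" else s

-- the 'replacements' dict (distinct keys, insertion order)
def pvRepl : List (List Char × List Char) :=
  [("minutes".toList, "m".toList), ("minute".toList, "m".toList),
   ("mins".toList, "m".toList), ("min".toList, "m".toList),
   ("seconds".toList, "s".toList), ("second".toList, "s".toList),
   ("secs".toList, "s".toList), ("sec".toList, "s".toList),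
   ("hours".toList, "h".toList), ("hour".toList, "h".toList),
   ("hrs".toList, "h".toList), ("hr".toList, "h".toList),
   ("days".toList, "d".toList), ("day".toList, "d".toList)]

-- 'for src, dst in replacements.items(): if token.endswith(src): token = token[:-len(src)] + dst; break'
def pvALoop : List (List Char × List Char) → List Char → List Char
  | [], token => token
  | (src, dst) :: rest, token =>
    if PySem.Chars.endswith token src then
      PySem.Chars.slice token none (some (-(src.length : Int))) ++ dst
    else pvALoop rest token

def normalize_interval_token_py (value : Option String) : Option String :=
  let token := PySem.Chars.lower (PySem.Chars.strip (pvRawA value).toList)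
  if token = [] then none
  else
    let token2 := PySem.Chars.replace token [' '] []
    let token3 := pvALoop pvRepl token2
    if token3 = [] then none else some (String.ofList token3)

-- ===== PORT B =====
-- 'value or ""'
def pvRawB (value : Option String) : String :=
  match value with
  | none => ""
  | some s => if s = "" then "" else s

-- the '_SUFFIX_WORDS' frozenset
def pvSuffixWords : PySem.Set (List Char) :=
  PySem.Set.ofList
    ["minutes".toList, "minute".toList, "mins".toList, "min".toList,
     "seconds".toList, "second".toList, "secs".toList, "sec".toList,
     "hours".toList, "hour".toList, "hrs".toList, "hr".toList,
     "days".toList, "day".toList]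

-- 'for n in (7,6,5,4,3,2): if n <= len(token) and token[-n:] in _SUFFIX_WORDS: return token[:-n] + token[-n]'
-- (token[-n] is guarded by n <= len(token), so the Option is flattened with toList)
def pvBLoop : List Nat → List Char → List Char
  | [], token => token
  | n :: rest, token =>
    if n ≤ token.length ∧ pvSuffixWords.contains (PySem.Chars.slice token (some (-(n : Int))) none) = true then
      PySem.Chars.slice token none (some (-(n : Int))) ++ (PySem.Chars.pyGet? token (-(n : Int))).toList
    else pvBLoop rest token

def normalize_interval_token_py_alt (value : Option String) : Option String :=
  let token := PySem.Chars.lower (PySem.Chars.strip (pvRawB value).toList)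
  if token = [] then none
  else some (String.ofList (pvBLoop [7, 6, 5, 4, 3, 2] (PySem.Chars.replace token [' '] [])))

-- ===== PRECONDITION & SPEC =====
def Spec_normalize_interval_token_py (value : Option String) (out : Option String) : Prop := out = normalize_interval_token_py_alt value
instance (value : Option String) (out : Option String) : Decidable (Spec_normalize_interval_token_py value out) := by unfold Spec_normalize_interval_token_py; infer_instance

-- ===== CLAIM (what is proved, stated in full; the proofs are below) =====
def Claim_equal_normalize_interval_token_py : Prop := ∀ (value : Option String), Dom_normalize_interval_token_py value → Spec_normalize_interval_token_py value (normalize_interval_token_py value)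

-- ===== LEMMAS AND PROOFS =====

-- pairwise: no key of the table is a suffix of a different key
lemma pv_keys_suffix_unique : ∀ k1 ∈ pvSuffixWords, ∀ k2 ∈ pvSuffixWords, k1 <:+ k2 → k1 = k2 := by decide

lemma pv_keys_in_repl : ∀ k ∈ pvSuffixWords, (k, k.take 1) ∈ pvRepl := by decide

lemma pv_repl_facts : ∀ p ∈ pvRepl, p.1 ∈ pvSuffixWords ∧ p.2 = p.1.take 1 ∧ p.2 ≠ [] ∧ p.1.length ∈ ([7, 6, 5, 4, 3, 2] : List Nat) := by decide

lemma pv_lens_pos : ∀ n ∈ ([7, 6, 5, 4, 3, 2] : List Nat), 0 < n := by decide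

-- two keys that are both suffixes of the same token are equal
lemma pv_match_unique {tok k1 k2 : List Char} (h1 : k1 ∈ pvSuffixWords) (h2 : k2 ∈ pvSuffixWords)
    (s1 : k1 <:+ tok) (s2 : k2 <:+ tok) : k1 = k2 := by
  rcases le_total k1.length k2.length with h | h
  · exact pv_keys_suffix_unique k1 h1 k2 h2 (List.suffix_of_suffix_length_le s1 s2 h)
  · exact (pv_keys_suffix_unique k2 h2 k1 h1 (List.suffix_of_suffix_length_le s2 s1 h)).symm

lemma pv_endswith_iff (tok k : List Char) : PySem.Chars.endswith tok k = true ↔ k <:+ tok := by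
  simp [PySem.Chars.endswith, List.isSuffixOf_iff_suffix]

lemma pvALoop_eq (l : List (List Char × List Char)) (tok : List Char) :
    pvALoop l tok =
      match l.find? (fun p => PySem.Chars.endswith tok p.1) with
      | some p => PySem.Chars.slice tok none (some (-(p.1.length : Int))) ++ p.2
      | none => tok := by
  induction l with
  | nil => rfl
  | cons p rest ih =>
    obtain ⟨src, dst⟩ := p
    by_cases h : PySem.Chars.endswith tok src
    · simp [pvALoop, List.find?, h]
    · simp [pvALoop, List.find?, h, ih]

lemma pvBLoop_eq (ns : List Nat) (tok : List Char) :
    pvBLoop ns tok =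
      match ns.find? (fun n => decide (n ≤ tok.length ∧ pvSuffixWords.contains (PySem.Chars.slice tok (some (-(n : Int))) none) = true)) with
      | some n => PySem.Chars.slice tok none (some (-(n : Int))) ++ (PySem.Chars.pyGet? tok (-(n : Int))).toList
      | none => tok := by
  induction ns with
  | nil => rfl
  | cons n rest ih =>
    by_cases h : n ≤ tok.length ∧ pvSuffixWords.contains (PySem.Chars.slice tok (some (-(n : Int))) none) = true
    · have hb := decide_eq_true h
      simp only [pvBLoop, List.find?, hb]
      rw [if_pos h]
    · have hb := decide_eq_false h
      simp only [pvBLoop, List.find?, hb]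
      rw [if_neg h, ih]

lemma pv_cond_iff (tok : List Char) (n : Nat) (hn : 0 < n) :
    (n ≤ tok.length ∧ pvSuffixWords.contains (PySem.Chars.slice tok (some (-(n : Int))) none) = true)
    ↔ ∃ k ∈ pvSuffixWords, k.length = n ∧ k <:+ tok := by
  have hs : PySem.Chars.slice tok (some (-(n : Int))) none = tok.drop (tok.length - n) := by
    simp [PySem.Chars.slice_eq_listSlice, PySem.List.slice_from_neg_natCast tok n hn]
  rw [hs]
  constructor
  · rintro ⟨hlen, hmem⟩
    refine ⟨tok.drop (tok.length - n), List.contains_iff_mem.mp hmem, ?_, List.drop_suffix _ _⟩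
    simp only [List.length_drop]
    omega
  · rintro ⟨k, hk, hkl, hsuf⟩
    have hlen : n ≤ tok.length := hkl ▸ hsuf.length_le
    have : k = tok.drop (tok.length - n) := by
      have := List.suffix_iff_eq_drop.mp hsuf
      rwa [hkl] at this
    exact ⟨hlen, List.contains_iff_mem.mpr (this ▸ hk)⟩

lemma pv_pyGet_tail (tok : List Char) (n : Nat) (hn : 0 < n) (hle : n ≤ tok.length) :
    (PySem.Chars.pyGet? tok (-(n : Int))).toList = (tok.drop (tok.length - n)).take 1 := by
  have h1 : PySem.Chars.pyGet? tok (-(n : Int)) = tok[tok.length - n]? := by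
    simp only [PySem.Chars.pyGet?_eq_listPyGet?, PySem.List.pyGet?, PySem.List.pyIdx?]
    rw [if_neg (by omega), if_pos (by omega)]
    simp
  rw [h1, List.take_one, List.head?_drop]

-- the two loops agree on every token
lemma pv_loop_eq (tok : List Char) : pvALoop pvRepl tok = pvBLoop [7, 6, 5, 4, 3, 2] tok := by
  rw [pvALoop_eq, pvBLoop_eq]
  cases hf : pvRepl.find? (fun p => PySem.Chars.endswith tok p.1) with
  | none =>
    have hnone : List.find? (fun n => decide (n ≤ tok.length ∧ pvSuffixWords.contains (PySem.Chars.slice tok (some (-(n : Int))) none) = true)) [7, 6, 5, 4, 3, 2] = none := by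
      rw [List.find?_eq_none]
      intro n hn hc
      obtain ⟨k, hk, _, hsuf⟩ := (pv_cond_iff tok n (pv_lens_pos n hn)).mp (of_decide_eq_true hc)
      exact (List.find?_eq_none.mp hf _ (pv_keys_in_repl k hk)) ((pv_endswith_iff tok k).mpr hsuf)
    rw [hnone]
  | some p =>
    have hps : PySem.Chars.endswith tok p.1 = true := by simpa using List.find?_some hf
    have hsuf : p.1 <:+ tok := (pv_endswith_iff tok p.1).mp hps
    obtain ⟨hk, hd, _, hlenmem⟩ := pv_repl_facts p (List.mem_of_find?_eq_some hf)
    have hcond : ∀ n, 0 < n →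
        ((n ≤ tok.length ∧ pvSuffixWords.contains (PySem.Chars.slice tok (some (-(n : Int))) none) = true) ↔ n = p.1.length) := by
      intro n hn
      rw [pv_cond_iff tok n hn]
      constructor
      · rintro ⟨k, hk2, hkl, hs2⟩
        rw [← hkl, pv_match_unique hk2 hk hs2 hsuf]
      · rintro rfl
        exact ⟨p.1, hk, rfl, hsuf⟩
    have hfind : List.find? (fun n => decide (n ≤ tok.length ∧ pvSuffixWords.contains (PySem.Chars.slice tok (some (-(n : Int))) none) = true)) [7, 6, 5, 4, 3, 2] = some p.1.length := by
      cases hg : List.find? (fun n => decide (n ≤ tok.length ∧ pvSuffixWords.contains (PySem.Chars.slice tok (some (-(n : Int))) none) = true)) [7, 6, 5, 4, 3, 2] with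
      | none =>
        exact absurd (decide_eq_true ((hcond p.1.length (pv_lens_pos _ hlenmem)).mpr rfl))
          (List.find?_eq_none.mp hg _ hlenmem)
      | some n' =>
        have h5 := List.find?_some hg
        simp only [decide_eq_true_eq] at h5
        rw [(hcond n' (pv_lens_pos n' (List.mem_of_find?_eq_some hg))).mp h5]
    rw [hfind]
    dsimp only
    have hlen : p.1.length ≤ tok.length := hsuf.length_le
    have hpos : 0 < p.1.length := pv_lens_pos _ hlenmem
    have hdrop : tok.drop (tok.length - p.1.length) = p.1 := (List.suffix_iff_eq_drop.mp hsuf).symm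
    rw [pv_pyGet_tail tok p.1.length hpos hlen, hdrop, hd]

-- replace(token, ' ', '') filters out the spaces
lemma pv_go_single (c : Char) : ∀ (fuel : Nat) (l acc : List Char), l.length ≤ fuel →
    PySem.Chars.replace.go [c] [] fuel l acc = acc.reverse ++ l.filter (fun x => !(x == c)) := by
  intro fuel
  induction fuel with
  | zero =>
    intro l acc h
    have : l = [] := by cases l <;> simp_all
    subst this
    simp [PySem.Chars.replace.go]
  | succ m ih =>
    intro l acc h
    cases l with
    | nil => simp [PySem.Chars.replace.go]
    | cons d t =>
      by_cases hd : c = d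
      · subst hd
        rw [show PySem.Chars.replace.go [c] [] (m + 1) (c :: t) acc = PySem.Chars.replace.go [c] [] m t acc by
            simp [PySem.Chars.replace.go, List.isPrefixOf]]
        rw [ih t acc (by simpa using Nat.le_of_succ_le_succ h)]
        simp
      · rw [show PySem.Chars.replace.go [c] [] (m + 1) (d :: t) acc = PySem.Chars.replace.go [c] [] m t (d :: acc) by
            simp [PySem.Chars.replace.go, List.isPrefixOf, hd]]
        rw [ih t (d :: acc) (by simpa using Nat.le_of_succ_le_succ h)]
        simp [Ne.symm hd]

lemma pv_replace_filter (t : List Char) (c : Char) :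
    PySem.Chars.replace t [c] [] = t.filter (fun x => !(x == c)) := by
  rw [show PySem.Chars.replace t [c] [] = PySem.Chars.replace.go [c] [] t.length t [] by
      simp [PySem.Chars.replace]]
  simpa using pv_go_single c t.length t [] le_rfl

-- the head of a nonempty strip is not whitespace
lemma pv_strip_head (s : List Char) (h : PySem.Chars.strip s ≠ []) :
    ∃ d rest, PySem.Chars.strip s = d :: rest ∧ PySem.Chars.isspace d = false := by
  have hpre : PySem.Chars.strip s <+: PySem.Chars.lstrip s := by
    have hsuf : (PySem.Chars.strip s).reverse <:+ (PySem.Chars.lstrip s).reverse := by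
      simp only [PySem.Chars.strip, PySem.Chars.rstrip, List.reverse_reverse]
      exact List.dropWhile_suffix _
    exact List.reverse_suffix.mp (by simpa using hsuf)
  obtain ⟨u, hu⟩ := hpre
  cases hst : PySem.Chars.strip s with
  | nil => exact absurd hst h
  | cons d rest =>
    refine ⟨d, rest, rfl, ?_⟩
    rw [hst] at hu
    have hl : List.dropWhile PySem.Chars.isspace s = d :: (rest ++ u) := by
      rw [show List.dropWhile PySem.Chars.isspace s = PySem.Chars.lstrip s from rfl, ← hu]
      simp
    have hne : List.dropWhile PySem.Chars.isspace s ≠ [] := by rw [hl]; simp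
    have h2 := List.head_dropWhile_not PySem.Chars.isspace hne
    simpa [hl] using h2

-- lowering a non-space character never yields a space
lemma pv_lowerChar_not_space (c : Char) (h : PySem.Chars.isspace c = false) :
    (PySem.Chars.lowerChar c == ' ') = false := by
  unfold PySem.Chars.lowerChar
  by_cases hu : PySem.Chars.isupper c = true
  · rw [if_pos hu]
    have hA : 'A' ≤ c ∧ c ≤ 'Z' := by simpa [PySem.Chars.isupper] using hu
    have h65 : 65 ≤ c.toNat := UInt32.le_iff_toNat_le.mp (Char.le_def.mp hA.1)
    have h90 : c.toNat ≤ 90 := UInt32.le_iff_toNat_le.mp (Char.le_def.mp hA.2)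
    rw [beq_eq_false_iff_ne]
    intro heq
    have h1 := congrArg Char.toNat heq
    rw [Char.toNat_ofNat, if_pos (Or.inl (by omega : c.toNat + 32 < 0xd800))] at h1
    have h32 : (' ' : Char).toNat = 32 := rfl
    rw [h32] at h1
    omega
  · rw [if_neg hu, beq_eq_false_iff_ne]
    intro heq
    subst heq
    simp [PySem.Chars.isspace] at h

lemma pvALoop_ne_nil (tok : List Char) (h : tok ≠ []) : pvALoop pvRepl tok ≠ [] := by
  rw [pvALoop_eq]
  cases hf : pvRepl.find? (fun p => PySem.Chars.endswith tok p.1) with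
  | none => exact h
  | some p =>
    obtain ⟨_, _, h2, _⟩ := pv_repl_facts p (List.mem_of_find?_eq_some hf)
    simp [h2]

-- the cleaned token is nonempty: its head is a non-space character that survives the space removal
lemma pv_clean_ne_nil (raw : List Char)
    (h : PySem.Chars.lower (PySem.Chars.strip raw) ≠ []) :
    PySem.Chars.replace (PySem.Chars.lower (PySem.Chars.strip raw)) [' '] [] ≠ [] := by
  have hst : PySem.Chars.strip raw ≠ [] := by
    intro he
    exact h (by simp [PySem.Chars.lower, he])
  obtain ⟨d, rest, hdr, hdsp⟩ := pv_strip_head raw hst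
  have hmem : PySem.Chars.lowerChar d ∈ PySem.Chars.lower (PySem.Chars.strip raw) := by
    simp only [PySem.Chars.lower, hdr]
    simp
  rw [pv_replace_filter]
  exact List.ne_nil_of_mem (List.mem_filter.mpr ⟨hmem, by simp [pv_lowerChar_not_space d hdsp]⟩)

-- ===== VERDICT (by name: the statement is the Claim_ definition above) =====
theorem normalize_interval_token_py_spec : Claim_equal_normalize_interval_token_py := by
  intro value _
  show normalize_interval_token_py value = normalize_interval_token_py_alt value
  simp only [normalize_interval_token_py, normalize_interval_token_py_alt, pvRawA, pvRawB]
  by_cases h : PySem.Chars.lower (PySem.Chars.strip (match value with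
      | none => ("" : String)
      | some s => if s = "" then "" else s).toList) = []
  · rw [if_pos h, if_pos h]
  · rw [if_neg h, if_neg h,
      if_neg (pvALoop_ne_nil _ (pv_clean_ne_nil _ h)), pv_loop_eq]
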